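-- pv_equiv track=rewrite | github.com/JochiRaider/sievio | repocapsule/licenses.py | _tokenize_spdx
-- ===== SOURCE A (Python) =====
-- def _tokenize_spdx(expr: str) -> list[str]:
--     tokens: list[str] = []
--     i = 0
--     while i < len(expr):
--         ch = expr[i]
--         if ch.isspace():
--             i += 1
--             continue
--         if ch in "()":
--             tokens.append(ch)
--             i += 1
--             continue
--         j = i
--         while j < len(expr) and not expr[j].isspace() and expr[j] not in "()":
--             j += 1
--         tokens.append(expr[i:j])
--         i = j
--     return tokens
-- ===== SOURCE B (Python) =====
-- def _tokenize_spdx(expr: str) -> list[str]: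
--     return expr.replace("(", " ( ").replace(")", " ) ").split()
-- ===== Notes on version B (the rewrite author's own statement) =====
-- stated objective: simpler
-- what changed: Replaced the index-driven character scanner (outer while with an inner word-extent while and slicing) by a transform-then-split pipeline: pad both parentheses with spaces via str.replace and tokenize with parameterless str.split(), whose whitespace rule matches isspace().
import Mathlib
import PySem

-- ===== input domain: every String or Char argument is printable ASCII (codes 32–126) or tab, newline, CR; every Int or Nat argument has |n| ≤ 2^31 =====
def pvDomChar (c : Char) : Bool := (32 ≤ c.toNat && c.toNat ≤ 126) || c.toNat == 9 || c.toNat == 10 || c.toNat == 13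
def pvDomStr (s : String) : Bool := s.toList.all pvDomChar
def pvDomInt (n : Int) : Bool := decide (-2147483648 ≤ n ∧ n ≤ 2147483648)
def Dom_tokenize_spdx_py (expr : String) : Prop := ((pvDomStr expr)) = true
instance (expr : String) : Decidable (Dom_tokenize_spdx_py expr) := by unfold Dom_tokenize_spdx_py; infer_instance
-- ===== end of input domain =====

-- B replaces A's index-driven scanner (outer while + inner word-extent while + slice) by the
-- transform-then-split pipeline: pad parentheses with spaces, then whitespace split; return values proved equal.

-- ===== PORT A =====
-- inner while loop: `while j < len(expr) and not expr[j].isspace() and expr[j] not in "()": j += 1`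
def tokAinner (s : List Char) (j : Nat) : Nat :=
  if h : j < s.length then
    if !(PySem.Chars.isspace s[j]) && !(s[j] == '(' || s[j] == ')') then
      tokAinner s (j + 1)
    else j
  else j
termination_by s.length - j

-- j ≤ tokAinner s j (cited by tokAgo's decreasing_by)
theorem tokAinner_ge (s : List Char) (j : Nat) : j ≤ tokAinner s j := by
  have key : ∀ n (j : Nat), s.length - j ≤ n → j ≤ tokAinner s j := by
    intro n
    induction n with
    | zero =>
      intro j hn
      rw [tokAinner]
      split_ifs with h1 h2
      · omega
      · exact le_refl j
      · exact le_refl j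
    | succ n ih =>
      intro j hn
      rw [tokAinner]
      split_ifs with h1 h2
      · exact le_trans (Nat.le_succ j) (ih (j + 1) (by omega))
      · exact le_refl j
      · exact le_refl j
  exact key (s.length - j) j (le_refl _)

-- outer while loop of A, with the running `tokens` accumulator
def tokAgo (s : List Char) (i : Nat) (tokens : List String) : List String :=
  if h : i < s.length then
    if PySem.Chars.isspace s[i] then
      tokAgo s (i + 1) tokens
    else if s[i] == '(' || s[i] == ')' then
      tokAgo s (i + 1) (tokens ++ [String.ofList [s[i]]])
    else
      tokAgo s (tokAinner s i)
        (tokens ++ [String.ofList (PySem.List.slice s (some (i : Int)) (some ((tokAinner s i : Nat) : Int)))])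
  else tokens
termination_by s.length - i
decreasing_by
  · omega
  · omega
  · have hgt : i < tokAinner s i := by
      rw [tokAinner]
      simp only [h, dif_pos]
      rw [if_pos (by simp_all)]
      exact lt_of_lt_of_le (Nat.lt_succ_self i) (tokAinner_ge s (i + 1))
    omega

def tokenize_spdx_py (expr : String) : List String := tokAgo expr.toList 0 []

-- ===== PORT B =====
def tokenize_spdx_py_alt (expr : String) : List String :=
  PySem.Str.split₀ (PySem.Str.replace (PySem.Str.replace expr "(" " ( ") ")" " ) ")

-- ===== PRECONDITION & SPEC =====
def Spec_tokenize_spdx_py (expr : String) (out : List String) : Prop := out = tokenize_spdx_py_alt expr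
instance (expr : String) (out : List String) : Decidable (Spec_tokenize_spdx_py expr out) := by unfold Spec_tokenize_spdx_py; infer_instance

-- ===== CLAIM (what is proved, stated in full; the proofs are below) =====
def Claim_equal_tokenize_spdx_py : Prop := ∀ (expr : String), Dom_tokenize_spdx_py expr → Spec_tokenize_spdx_py expr (tokenize_spdx_py expr)

-- ===== LEMMAS AND PROOFS =====

-- a character that neither stops A's inner loop nor is padded/split by B
def pvWordChar (c : Char) : Bool := !(PySem.Chars.isspace c) && !(c == '(' || c == ')')

-- common reference tokenization both ports are reduced to
def pvTok : List Char → List (List Char)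
  | [] => []
  | c :: t =>
    if PySem.Chars.isspace c then pvTok t
    else if c == '(' || c == ')' then [c] :: pvTok t
    else (c :: t.takeWhile pvWordChar) :: pvTok (t.dropWhile pvWordChar)
termination_by s => s.length
decreasing_by
  · simp
  · simp
  · exact lt_of_le_of_lt (List.length_dropWhile_le pvWordChar t) (by simp)

-- what B's padding does to one character
def pvPad (c : Char) : List Char :=
  if c == '(' then [' ', '(', ' '] else if c == ')' then [' ', ')', ' '] else [c]

theorem pvTok_nil : pvTok [] = [] := by simp [pvTok]

theorem pvTok_cons_space (c : Char) (t : List Char) (hs : PySem.Chars.isspace c = true) :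
    pvTok (c :: t) = pvTok t := by
  simp only [pvTok]
  rw [if_pos hs]

theorem pvTok_cons_paren (c : Char) (t : List Char) (hs : PySem.Chars.isspace c = false)
    (hp : (c == '(' || c == ')') = true) : pvTok (c :: t) = [c] :: pvTok t := by
  simp only [pvTok]
  rw [if_neg (by simp [hs]), if_pos hp]

theorem pvTok_cons_word (c : Char) (t : List Char) (hs : PySem.Chars.isspace c = false)
    (hp : (c == '(' || c == ')') = false) :
    pvTok (c :: t) = (c :: t.takeWhile pvWordChar) :: pvTok (t.dropWhile pvWordChar) := by
  simp only [pvTok]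
  rw [if_neg (by simp [hs]), if_neg (by simp [hp])]

theorem pvSpaceNotParen (c : Char) (hs : PySem.Chars.isspace c = true) :
    (c == '(') = false ∧ (c == ')') = false := by
  constructor
  · cases hc : (c == '(') with
    | false => rfl
    | true => have h := eq_of_beq hc; subst h; exact absurd hs (by decide)
  · cases hc : (c == ')') with
    | false => rfl
    | true => have h := eq_of_beq hc; subst h; exact absurd hs (by decide)

theorem pvPadSpace (c : Char) (hs : PySem.Chars.isspace c = true) : pvPad c = [c] := by
  obtain ⟨h1, h2⟩ := pvSpaceNotParen c hs
  simp [pvPad, h1, h2]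

theorem pvPadWord (c : Char) (hp : (c == '(' || c == ')') = false) : pvPad c = [c] := by
  obtain ⟨h1, h2⟩ := Bool.or_eq_false_iff.mp hp
  simp [pvPad, h1, h2]

theorem pvPadParen (c : Char) (hp : (c == '(' || c == ')') = true) : pvPad c = [' ', c, ' '] := by
  rcases (by simpa using hp : c = '(' ∨ c = ')') with h | h
  · subst h; simp [pvPad]
  · subst h; simp [pvPad]

theorem pvWordCharNotSpace (c : Char) (h : pvWordChar c = true) :
    PySem.Chars.isspace c = false := by
  cases hsp : PySem.Chars.isspace c with
  | false => rfl
  | true => simp [pvWordChar, hsp] at h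

theorem pvSpaceIsspace : PySem.Chars.isspace ' ' = true := by decide

theorem pvReplaceGo (c : Char) (new : List Char) :
    ∀ (l : List Char) (fuel : Nat) (acc : List Char), l.length ≤ fuel →
      PySem.Chars.replace.go [c] new fuel l acc
        = acc.reverse ++ l.flatMap (fun x => if x == c then new else [x]) := by
  intro l
  induction l with
  | nil =>
    intro fuel acc _
    cases fuel <;> simp [PySem.Chars.replace.go]
  | cons x t ih =>
    intro fuel acc hf
    cases fuel with
    | zero => simp at hf
    | succ n =>
      by_cases hx : x = c
      · subst hx
        have hpre : List.isPrefixOf [x] (x :: t) = true := by simp [List.isPrefixOf]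
        simp only [PySem.Chars.replace.go, hpre, if_pos]
        have hdrop : List.drop (List.length [x]) (x :: t) = t := by simp
        rw [hdrop, ih n (new.reverse ++ acc) (by simpa using Nat.le_of_succ_le_succ hf)]
        simp
      · have hpre : List.isPrefixOf [c] (x :: t) = false := by
          simp [List.isPrefixOf]
          exact fun h => absurd h.symm hx
        simp only [PySem.Chars.replace.go, hpre, Bool.false_eq_true, if_false]
        rw [ih n (x :: acc) (by simpa using Nat.le_of_succ_le_succ hf)]
        simp [hx]

theorem pvReplaceChar (s : List Char) (c : Char) (new : List Char) :
    PySem.Chars.replace s [c] new = s.flatMap (fun x => if x == c then new else [x]) := by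
  unfold PySem.Chars.replace
  simp only [List.isEmpty_cons, Bool.false_eq_true, if_false]
  simpa using pvReplaceGo c new s s.length [] (le_refl _)

theorem pvPadded (s : List Char) :
    PySem.Chars.replace (PySem.Chars.replace s ['('] [' ', '(', ' ']) [')'] [' ', ')', ' ']
      = s.flatMap pvPad := by
  rw [pvReplaceChar, pvReplaceChar]
  induction s with
  | nil => simp
  | cons x t ih =>
    rw [List.flatMap_cons, List.flatMap_append, ih, List.flatMap_cons]
    by_cases h1 : x = '('
    · subst h1; simp [pvPad]
    · by_cases h2 : x = ')'
      · subst h2; simp [pvPad]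
      · simp [pvPad, h1, h2]

-- step equations for split₀.go
theorem pvGoNil (cur : List Char) (acc : List (List Char)) :
    PySem.Chars.split₀.go [] cur acc
      = if cur.isEmpty then acc.reverse else (cur.reverse :: acc).reverse := rfl

theorem pvGoCons (c : Char) (rest cur : List Char) (acc : List (List Char)) :
    PySem.Chars.split₀.go (c :: rest) cur acc
      = if PySem.Chars.isspace c then
          (if cur.isEmpty then PySem.Chars.split₀.go rest [] acc
           else PySem.Chars.split₀.go rest [] (cur.reverse :: acc))
        else PySem.Chars.split₀.go rest (c :: cur) acc := rfl

-- split₀.go consumes a run of non-space characters into `cur`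
theorem pvGoWord (w : List Char) (hw : ∀ c ∈ w, PySem.Chars.isspace c = false) :
    ∀ (rest cur : List Char) (acc : List (List Char)),
      PySem.Chars.split₀.go (w ++ rest) cur acc
        = PySem.Chars.split₀.go rest (w.reverse ++ cur) acc := by
  induction w with
  | nil => intro rest cur acc; simp
  | cons c t ih =>
    intro rest cur acc
    have hc : PySem.Chars.isspace c = false := hw c (by simp)
    rw [List.cons_append, pvGoCons, if_neg (by simp [hc])]
    rw [ih (fun d hd => hw d (by simp [hd])) rest (c :: cur) acc]
    simp

theorem pvFlatMapWord (l : List Char) (hl : ∀ c ∈ l, pvWordChar c = true) :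
    l.flatMap pvPad = l := by
  induction l with
  | nil => simp
  | cons c t ih =>
    have hc := hl c (by simp)
    have hp : (c == '(' || c == ')') = false := by
      cases hq : (c == '(' || c == ')') with
      | false => rfl
      | true => simp [pvWordChar, hq] at hc
    rw [List.flatMap_cons, ih (fun d hd => hl d (by simp [hd])), pvPadWord c hp]
    simp

theorem pvDropWhileHead (p : Char → Bool) (l : List Char) (d : Char) (r : List Char)
    (h : l.dropWhile p = d :: r) : p d = false := by
  induction l with
  | nil => simp at h
  | cons x t ih =>
    rw [List.dropWhile_cons] at h
    split_ifs at h with hx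
    · exact ih h
    · cases h; simpa using hx

theorem pvDropLenTakeWhile (p : Char → Bool) (l : List Char) :
    l.drop (l.takeWhile p).length = l.dropWhile p := by
  induction l with
  | nil => simp
  | cons x t ih =>
    cases hx : p x with
    | true =>
      rw [List.takeWhile_cons, if_pos hx, List.dropWhile_cons, if_pos hx,
        List.length_cons, List.drop_succ_cons]
      exact ih
    | false =>
      rw [List.takeWhile_cons, if_neg (by simp [hx]), List.dropWhile_cons, if_neg (by simp [hx])]
      simp

theorem pvGoPad : ∀ (n : Nat) (s : List Char) (acc : List (List Char)), s.length ≤ n →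
    PySem.Chars.split₀.go (s.flatMap pvPad) [] acc = acc.reverse ++ pvTok s := by
  intro n
  induction n with
  | zero =>
    intro s acc hn
    have hnil : s = [] := by cases s <;> simp_all
    subst hnil
    rw [List.flatMap_nil, pvGoNil, if_pos List.isEmpty_nil, pvTok_nil, List.append_nil]
  | succ n ih =>
    intro s acc hn
    match s with
    | [] => rw [List.flatMap_nil, pvGoNil, if_pos List.isEmpty_nil, pvTok_nil, List.append_nil]
    | c :: t =>
      have ht : t.length ≤ n := by simpa using hn
      by_cases hs : PySem.Chars.isspace c = true
      · rw [List.flatMap_cons, pvPadSpace c hs, List.singleton_append, pvGoCons,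
          if_pos hs, if_pos List.isEmpty_nil, ih t acc ht, pvTok_cons_space c t hs]
      · have hs' : PySem.Chars.isspace c = false := by simpa using hs
        by_cases hp : (c == '(' || c == ')') = true
        · rw [List.flatMap_cons, pvPadParen c hp, List.cons_append, List.cons_append,
            List.cons_append, List.nil_append]
          rw [pvGoCons, if_pos pvSpaceIsspace, if_pos List.isEmpty_nil]
          rw [pvGoCons, if_neg (by simp [hs'])]
          rw [pvGoCons, if_pos pvSpaceIsspace, if_neg (by simp), List.reverse_singleton]
          rw [ih t ([c] :: acc) ht, pvTok_cons_paren c t hs' hp]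
          simp
        · have hp' : (c == '(' || c == ')') = false := by simpa using hp
          have hw : pvWordChar c = true := by simp [pvWordChar, hs', hp']
          have htwall : ∀ d ∈ t.takeWhile pvWordChar, pvWordChar d = true :=
            fun d hd => List.mem_takeWhile_imp hd
          have hwall : ∀ d ∈ (c :: t.takeWhile pvWordChar), PySem.Chars.isspace d = false := by
            intro d hd
            rcases List.mem_cons.mp hd with h | h
            · subst h; exact hs'
            · exact pvWordCharNotSpace d (htwall d h)
          have hflat : (c :: t).flatMap pvPad
              = (c :: t.takeWhile pvWordChar) ++ (t.dropWhile pvWordChar).flatMap pvPad := by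
            rw [List.flatMap_cons, pvPadWord c hp']
            conv_lhs => rw [show t = t.takeWhile pvWordChar ++ t.dropWhile pvWordChar from
              (List.takeWhile_append_dropWhile).symm]
            rw [List.flatMap_append, pvFlatMapWord (t.takeWhile pvWordChar) htwall]
            simp
          rw [hflat, pvGoWord (c :: t.takeWhile pvWordChar) hwall, List.append_nil,
            pvTok_cons_word c t hs' hp']
          cases hdweq : t.dropWhile pvWordChar with
          | nil =>
            rw [List.flatMap_nil, pvGoNil, if_neg (by simp), List.reverse_reverse,
              pvTok_nil]
            simp
          | cons d r =>
            have hd : pvWordChar d = false := pvDropWhileHead pvWordChar t d r hdweq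
            have hrlen : r.length ≤ n := by
              have h1 : (d :: r).length ≤ t.length := by
                rw [← hdweq]; exact List.length_dropWhile_le _ _
              simp at h1
              omega
            rw [List.flatMap_cons]
            by_cases hds : PySem.Chars.isspace d = true
            · rw [pvPadSpace d hds, List.singleton_append, pvGoCons, if_pos hds,
                if_neg (by simp), List.reverse_reverse, ih r ((c :: t.takeWhile pvWordChar) :: acc) hrlen,
                pvTok_cons_space d r hds]
              simp
            · have hds' : PySem.Chars.isspace d = false := by simpa using hds
              have hdp : (d == '(' || d == ')') = true := by
                cases hq : (d == '(' || d == ')') with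
                | true => rfl
                | false => simp [pvWordChar, hds', hq] at hd
              rw [pvPadParen d hdp, List.cons_append, List.cons_append, List.cons_append,
                List.nil_append]
              rw [pvGoCons, if_pos pvSpaceIsspace, if_neg (by simp), List.reverse_reverse]
              rw [pvGoCons, if_neg (by simp [hds'])]
              rw [pvGoCons, if_pos pvSpaceIsspace, if_neg (by simp), List.reverse_singleton]
              rw [ih r ([d] :: (c :: t.takeWhile pvWordChar) :: acc) hrlen,
                pvTok_cons_paren d r hds' hdp]
              simp

-- A's inner loop measures exactly the takeWhile extent of the word
theorem pvInnerEq : ∀ (n : Nat) (s : List Char) (j : Nat), s.length - j ≤ n →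
    tokAinner s j = j + ((s.drop j).takeWhile pvWordChar).length := by
  intro n
  induction n with
  | zero =>
    intro s j hn
    have hj : s.length ≤ j := by omega
    rw [tokAinner, dif_neg (by omega)]
    rw [List.drop_eq_nil_of_le hj]
    simp
  | succ n ih =>
    intro s j hn
    by_cases h : j < s.length
    · by_cases hw : pvWordChar s[j] = true
      · rw [tokAinner, dif_pos h, if_pos (by simpa [pvWordChar] using hw)]
        rw [ih s (j + 1) (by omega)]
        rw [List.drop_eq_getElem_cons h, List.takeWhile_cons, if_pos hw]
        simp
        omega
      · rw [tokAinner, dif_pos h, if_neg (by simpa [pvWordChar] using hw)]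
        rw [List.drop_eq_getElem_cons h, List.takeWhile_cons, if_neg hw]
        simp
    · rw [tokAinner, dif_neg h]
      rw [List.drop_eq_nil_of_le (by omega)]
      simp

theorem pvGoAEq : ∀ (n : Nat) (s : List Char) (i : Nat) (acc : List String), s.length - i ≤ n →
    tokAgo s i acc = acc ++ (pvTok (s.drop i)).map (fun w => String.ofList w) := by
  intro n
  induction n with
  | zero =>
    intro s i acc hn
    rw [tokAgo, dif_neg (by omega)]
    rw [List.drop_eq_nil_of_le (by omega), pvTok_nil]
    simp
  | succ n ih =>
    intro s i acc hn
    by_cases h : i < s.length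
    · by_cases hs : PySem.Chars.isspace s[i] = true
      · rw [tokAgo, dif_pos h, if_pos hs, ih s (i + 1) acc (by omega)]
        conv_rhs => rw [List.drop_eq_getElem_cons h, pvTok_cons_space s[i] _ hs]
      · have hs' : PySem.Chars.isspace s[i] = false := by simpa using hs
        by_cases hp : (s[i] == '(' || s[i] == ')') = true
        · rw [tokAgo, dif_pos h, if_neg hs, if_pos hp,
            ih s (i + 1) (acc ++ [String.ofList [s[i]]]) (by omega)]
          conv_rhs => rw [List.drop_eq_getElem_cons h, pvTok_cons_paren s[i] _ hs' hp]
          simp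
        · -- word branch
          have hp' : (s[i] == '(' || s[i] == ')') = false := by simpa using hp
          have hw : pvWordChar s[i] = true := by simp [pvWordChar, hs', hp']
          have hinner : tokAinner s i = i + ((s.drop i).takeWhile pvWordChar).length :=
            pvInnerEq (s.length - i) s i (le_refl _)
          have htwcons : (s.drop i).takeWhile pvWordChar
              = s[i] :: ((s.drop (i + 1)).takeWhile pvWordChar) := by
            rw [List.drop_eq_getElem_cons h, List.takeWhile_cons, if_pos hw]
          have hslice : PySem.List.slice s (some (i : Int)) (some ((tokAinner s i : Nat) : Int))
              = (s.drop i).takeWhile pvWordChar := by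
            rw [PySem.List.slice_natCast, hinner]
            have heq : i + ((s.drop i).takeWhile pvWordChar).length - i
                = ((s.drop i).takeWhile pvWordChar).length := by omega
            rw [heq]
            exact (List.prefix_iff_eq_take.mp (List.takeWhile_prefix pvWordChar)).symm
          have hdropj : s.drop (tokAinner s i) = (s.drop i).dropWhile pvWordChar := by
            have h2 := pvDropLenTakeWhile pvWordChar (s.drop i)
            rw [List.drop_drop] at h2
            rw [hinner]
            exact h2
          have hlt : i < tokAinner s i := by
            rw [hinner, htwcons]; simp
          rw [tokAgo, dif_pos h, if_neg hs, if_neg (by simpa using hp)]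
          rw [ih s (tokAinner s i) _ (by omega)]
          rw [hslice, hdropj]
          have hdw : (s.drop i).dropWhile pvWordChar = (s.drop (i + 1)).dropWhile pvWordChar := by
            rw [List.drop_eq_getElem_cons h, List.dropWhile_cons, if_pos hw]
          rw [hdw, htwcons]
          conv_rhs => rw [List.drop_eq_getElem_cons h, pvTok_cons_word s[i] _ hs' hp']
          simp
    · rw [tokAgo, dif_neg h]
      rw [List.drop_eq_nil_of_le (by omega), pvTok_nil]
      simp

-- ===== VERDICT (by name: the statement is the Claim_ definition above) =====
theorem tokenize_spdx_py_spec : Claim_equal_tokenize_spdx_py := by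
  intro expr _
  unfold Spec_tokenize_spdx_py tokenize_spdx_py tokenize_spdx_py_alt
  rw [pvGoAEq expr.toList.length expr.toList 0 [] (by omega), List.drop_zero, List.nil_append]
  rw [show ∀ x : String, PySem.Str.split₀ x = List.map String.ofList (PySem.Chars.split₀ x.toList)
    from fun _ => rfl]
  rw [PySem.Str.toList_replace, PySem.Str.toList_replace]
  rw [show ("(" : String).toList = ['('] from by decide,
    show (" ( " : String).toList = [' ', '(', ' '] from by decide,
    show (")" : String).toList = [')'] from by decide,
    show (" ) " : String).toList = [' ', ')', ' '] from by decide]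
  rw [pvPadded]
  rw [show ∀ y : List Char, PySem.Chars.split₀ y = PySem.Chars.split₀.go y [] [] from fun _ => rfl]
  rw [pvGoPad expr.toList.length expr.toList [] (le_refl _)]
  simp
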